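-- pv_equiv track=rewrite | github.com/muratozkan/aoc2018 | day_2.py | freq_letter
-- ===== SOURCE A (Python) =====
-- def freq_letter(id):
--     letters = {}
--     for ch in id:
--         c = letters.get(ch, 0)
--         letters[ch] = c + 1
--
--     freqs = {}
--     for (k, v) in letters.items():
--         lc = freqs.get(v, 0)
--         freqs[v] = lc + 1
--
--     return freqs
-- ===== SOURCE B (Python) =====
-- def freq_letter(id):
--     def runs(xs):
--         # recursive partition: record the head's multiplicity, recurse on the rest
--         if not xs:
--             return []
--         h = xs[0]
--         rest = [x for x in xs if x != h]
--         return [(h, len(xs) - len(rest))] + runs(rest)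
--     counts = [c for _, c in runs(list(id))]
--     return dict(runs(counts))
-- ===== Notes on version B (the rewrite author's own statement) =====
-- stated objective: alternative
-- what changed: Both hash-dict accumulation loops are replaced by one recursive partition routine runs(xs) that records the head's multiplicity as len(xs)-len(rest) after filtering the head out and recurses on the remainder; it is applied to the characters and again to the resulting counts, and the final dict is built once from the distinct-key pair list.
import Mathlib
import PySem

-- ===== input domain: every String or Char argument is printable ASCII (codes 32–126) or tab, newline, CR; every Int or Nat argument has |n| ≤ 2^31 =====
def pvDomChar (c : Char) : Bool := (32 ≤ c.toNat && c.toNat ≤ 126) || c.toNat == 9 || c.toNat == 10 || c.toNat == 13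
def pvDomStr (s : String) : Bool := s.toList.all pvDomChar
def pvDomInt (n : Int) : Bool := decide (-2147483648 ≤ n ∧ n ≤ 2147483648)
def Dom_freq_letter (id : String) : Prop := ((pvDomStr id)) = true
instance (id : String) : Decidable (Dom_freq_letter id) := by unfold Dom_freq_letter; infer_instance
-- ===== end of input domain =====

-- B replaces both hash-accumulation loops by a recursive partition ("record the head's
-- multiplicity, filter it out, recurse"), using no dict at all; objective: alternative.

-- ===== PORT A =====
def freq_letter (id : String) : List (Int × Int) :=
  let letters : PySem.Dict Char Int :=
    id.toList.foldl (fun d ch => d.insert ch (d.getD ch 0 + 1)) PySem.Dict.empty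
  let freqs : PySem.Dict Int Int :=
    letters.items.foldl (fun d kv => d.insert kv.2 (d.getD kv.2 0 + 1)) PySem.Dict.empty
  freqs.items

-- ===== PORT B =====
-- runs(xs): if xs empty → []; else record (head, len(xs) - len(rest)) with
-- rest = [x for x in xs if x != head], then recurse on rest.
def pvRuns {α : Type} [BEq α] [LawfulBEq α] (xs : List α) : List (α × Int) :=
  match xs with
  | [] => []
  | h :: t =>
      (h, ((h :: t).length : Int) - (((h :: t).filter (fun x => x != h)).length : Int))
        :: pvRuns ((h :: t).filter (fun x => x != h))
termination_by xs.length
decreasing_by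
  simp only [List.filter_cons, bne_self_eq_false, if_false, Bool.false_eq_true, List.length_cons]
  exact Nat.lt_succ_of_le (List.length_filter_le _ _)

def freq_letter_alt (id : String) : List (Int × Int) :=
  let counts : List Int := (pvRuns id.toList).map (fun p => p.2)
  (PySem.Dict.ofList (pvRuns counts)).items

-- ===== PRECONDITION & SPEC =====
def Spec_freq_letter (id : String) (out : List (Int × Int)) : Prop := out = freq_letter_alt id
instance (id : String) (out : List (Int × Int)) : Decidable (Spec_freq_letter id out) := by unfold Spec_freq_letter; infer_instance

-- ===== CLAIM (what is proved, stated in full; the proofs are below) =====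
def Claim_equal_freq_letter : Prop := ∀ (id : String), Dom_freq_letter id → Spec_freq_letter id (freq_letter id)

-- ===== LEMMAS AND PROOFS =====

theorem setAdd_of_mem {α : Type} [BEq α] [LawfulBEq α] (acc : List α) (x : α) (h : x ∈ acc) :
    PySem.Set.add acc x = acc := by
  simp [PySem.Set.add, PySem.Set.contains, h]

theorem foldl_add_filter {α : Type} [BEq α] [LawfulBEq α] (x : α) (l : List α) :
    ∀ acc : List α, x ∈ acc →
      List.foldl PySem.Set.add acc l = List.foldl PySem.Set.add acc (l.filter (fun y => y != x)) := by
  induction l with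
  | nil => intro acc _; rfl
  | cons y t ih =>
      intro acc hx
      by_cases hyx : y = x
      · subst hyx
        simp only [List.filter_cons, bne_self_eq_false, List.foldl_cons,
          setAdd_of_mem acc y hx]
        exact ih acc hx
      · have : (y != x) = true := by simp [hyx]
        simp only [List.filter_cons, this, List.foldl_cons]
        apply ih
        unfold PySem.Set.add
        split <;> simp [hx]

theorem foldl_add_cons_of_forall_ne {α : Type} [BEq α] [LawfulBEq α] (x : α) (l : List α)
    (hl : ∀ y ∈ l, y ≠ x) :
    ∀ acc : List α, List.foldl PySem.Set.add (x :: acc) l = x :: List.foldl PySem.Set.add acc l := by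
  induction l with
  | nil => intro acc; rfl
  | cons y t ih =>
      intro acc
      have hyx : y ≠ x := hl y (by simp)
      have hc : PySem.Set.contains (x :: acc) y = PySem.Set.contains acc y := by
        simp [PySem.Set.contains, hyx]
      have ht : ∀ y ∈ t, y ≠ x := fun z hz => hl z (by simp [hz])
      simp only [List.foldl_cons]
      unfold PySem.Set.add
      rw [hc]
      split
      · exact ih ht acc
      · exact ih ht (acc ++ [y])

theorem dedup_cons {α : Type} [BEq α] [LawfulBEq α] (x : α) (l : List α) :
    PySem.List.dedup (x :: l) = x :: PySem.List.dedup (l.filter (fun y => y != x)) := by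
  have h1 : PySem.List.dedup (x :: l) = List.foldl PySem.Set.add [x] l := by
    simp [PySem.List.dedup, PySem.Set.ofList, PySem.Set.add, PySem.Set.empty,
      PySem.Set.contains]
  rw [h1, foldl_add_filter x l [x] (by simp)]
  exact foldl_add_cons_of_forall_ne x _ (by
    intro y hy
    have := List.of_mem_filter hy
    simpa using this) []

theorem count_add_length_filter {α : Type} [BEq α] [LawfulBEq α] (h : α) (t : List α) :
    List.count h t + (t.filter (fun x => x != h)).length = t.length := by
  induction t with
  | nil => simp
  | cons y s ih =>
      by_cases hy : y = h
      · subst hy; simp; omega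
      · simp [hy]; omega

theorem count_filter_ne {α : Type} [BEq α] [LawfulBEq α] (k h : α) (t : List α) (hk : k ≠ h) :
    List.count k (t.filter (fun x => x != h)) = List.count k t := by
  simp [List.count_filter, hk]

theorem pvRuns_eq_dedup_map {α : Type} [BEq α] [LawfulBEq α] :
    ∀ (n : Nat) (xs : List α), xs.length ≤ n →
      pvRuns xs = (PySem.List.dedup xs).map (fun k => (k, (xs.count k : Int))) := by
  intro n
  induction n with
  | zero =>
      intro xs hxs
      have hx : xs = [] := List.eq_nil_of_length_eq_zero (Nat.le_zero.mp hxs)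
      subst hx
      simp [pvRuns]
  | succ n ih =>
      intro xs hxs
      match xs with
      | [] => simp [pvRuns]
      | h :: t =>
          rw [pvRuns, dedup_cons]
          have hrest : (h :: t).filter (fun x => x != h) = t.filter (fun x => x != h) := by
            simp
          have hlen : (t.filter (fun x => x != h)).length ≤ n := by
            have := List.length_filter_le (fun x => x != h) t
            simp only [List.length_cons] at hxs
            omega
          rw [hrest, ih _ hlen]
          simp only [List.map_cons, List.cons.injEq]
          refine ⟨?_, ?_⟩
          · have hc := count_add_length_filter h t
            have hch : List.count h (h :: t) = List.count h t + 1 := by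
              simp
            simp only [List.length_cons, hch, Prod.mk.injEq, true_and]
            push_cast
            omega
          · apply List.map_congr_left
            intro k hk
            have hkh : k ≠ h := by
              have hkm : k ∈ t.filter (fun x => x != h) :=
                (PySem.List.mem_dedup _ k).mp hk
              have := List.of_mem_filter hkm
              simpa using this
            rw [count_filter_ne k h t hkh]
            simp [Ne.symm hkh]

theorem pvRuns_eq_counter_items {α : Type} [BEq α] [LawfulBEq α] (xs : List α) :
    pvRuns xs = (PySem.Dict.counter xs).items := by
  rw [PySem.Dict.items_counter, pvRuns_eq_dedup_map xs.length xs le_rfl]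
  simp [PySem.List.dedup_eq_ofList]

theorem counter_map_snd {β κ : Type} [BEq κ] [LawfulBEq κ] (l : List (β × κ)) :
    PySem.Dict.counter (l.map (fun p => p.2))
      = l.foldl (fun d kv => d.insert kv.2 (d.getD kv.2 0 + 1)) PySem.Dict.empty := by
  rw [← PySem.Dict.foldl_insert_getD_add_one_eq_counter, List.foldl_map]

theorem freq_letter_eq_counter (id : String) :
    freq_letter id
      = (PySem.Dict.counter ((PySem.Dict.counter id.toList).items.map (fun p => p.2))).items := by
  have hA : freq_letter id = ((PySem.Dict.counter id.toList).items.foldl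
      (fun d kv => d.insert kv.2 (d.getD kv.2 0 + 1)) PySem.Dict.empty).items := rfl
  rw [hA, counter_map_snd]

theorem items_ofList_of_nodup {α β : Type} [BEq α] [LawfulBEq α] (ps : List (α × β))
    (hnd : (ps.map Prod.fst).Nodup) :
    (PySem.Dict.ofList ps).items = ps := by
  have hof : PySem.Dict.ofList ps
      = ps.foldl (fun d p => d.insert p.1 p.2) PySem.Dict.empty := rfl
  rw [hof,
    PySem.Dict.items_foldl_insert_fresh (k := Prod.fst) (v := Prod.snd)
      (d := PySem.Dict.empty) (l := ps)
      (fun a _ => PySem.Dict.contains_empty a.1) hnd]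
  simp [PySem.Dict.empty]

theorem nodup_map_fst_pvRuns {α : Type} [BEq α] [LawfulBEq α] (xs : List α) :
    ((pvRuns xs).map Prod.fst).Nodup := by
  rw [pvRuns_eq_dedup_map xs.length xs le_rfl]
  simp only [List.map_map]
  rw [show (Prod.fst ∘ fun k => (k, (xs.count k : Int))) = id from rfl, List.map_id]
  exact PySem.List.nodup_dedup xs

-- ===== VERDICT (by name: the statement is the Claim_ definition above) =====
theorem freq_letter_spec : Claim_equal_freq_letter := by
  intro id _
  unfold Spec_freq_letter
  rw [freq_letter_eq_counter]
  show _ = (PySem.Dict.ofList (pvRuns ((pvRuns id.toList).map (fun p => p.2)))).items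
  rw [items_ofList_of_nodup _ (nodup_map_fst_pvRuns _)]
  simp only [pvRuns_eq_counter_items]
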